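-- pv_equiv track=rewrite | github.com/ZerxXxes/rct-track-ai | main.py | calculate_segment_positions
-- ===== SOURCE A (Python) =====
-- def calculate_segment_positions(track_names, segment_dict):
--     position = [0, 0, 0]  # [x, y, z]
--     current_orientation = 0  # 0 degrees, facing 'north'/positive x-axis initially
--     positions = [tuple(position)]  # Store initial position
--
--     for name in track_names:
--         segment_info = segment_dict.get(name, {})
--         forward_delta = int(segment_info.get('ForwardDelta', 0))
--         sideways_delta = int(segment_info.get('SidewaysDelta', 0))
--         elevation_delta = int(segment_info.get('ElevationDelta', 0))
--
--         # Apply movement deltas based on current orientation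
--         if current_orientation == 0:  # Facing 'north'
--             position[0] += forward_delta
--             position[1] += sideways_delta
--         elif current_orientation == 90:  # Facing 'west'
--             position[1] += forward_delta
--             position[0] -= sideways_delta
--         elif current_orientation == 180:  # Facing 'south'
--             position[0] -= forward_delta
--             position[1] -= sideways_delta
--         elif current_orientation == 270:  # Facing 'east'
--             position[1] -= forward_delta
--             position[0] += sideways_delta
--
--         position[2] += elevation_delta  # Update elevation
--         positions.append(tuple(position))
--
--         # Update orientation for the next segment
--         direction_delta = segment_info.get('DirectionDelta', None)
--         if direction_delta == 'DIR_90_DEG_LEFT':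
--             current_orientation += 90
--         elif direction_delta == 'DIR_90_DEG_RIGHT':
--             current_orientation -= 90
--         current_orientation %= 360  # Normalize the orientation
--
--     return positions
-- ===== SOURCE B (Python) =====
-- def calculate_segment_positions(track_names, segment_dict):
--     # Staged pipeline: (1) resolve segment infos, (2) prefix-count quarter turns,
--     # (3) rotate each segment's local delta into world coordinates via a mod-4
--     # rotation table, (4) prefix-sum the world deltas into positions.
--     infos = [segment_dict.get(name, {}) for name in track_names]
--
--     turns = []          # quarter-turn count *before* each segment
--     t = 0
--     for info in infos:
--         turns.append(t)
--         d = info.get('DirectionDelta', None)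
--         if d == 'DIR_90_DEG_LEFT':
--             t += 1
--         elif d == 'DIR_90_DEG_RIGHT':
--             t -= 1
--
--     COS = (1, 0, -1, 0)
--     SIN = (0, 1, 0, -1)
--     deltas = []
--     for info, t in zip(infos, turns):
--         f = int(info.get('ForwardDelta', 0))
--         s = int(info.get('SidewaysDelta', 0))
--         e = int(info.get('ElevationDelta', 0))
--         c, si = COS[t % 4], SIN[t % 4]
--         deltas.append((f * c - s * si, f * si + s * c, e))
--
--     positions = [(0, 0, 0)]
--     x = y = z = 0
--     for dx, dy, dz in deltas:
--         x += dx; y += dy; z += dz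
--         positions.append((x, y, z))
--     return positions
-- ===== Notes on version B (the rewrite author's own statement) =====
-- stated objective: alternative
-- what changed: Replaces A's single stateful turtle loop (orientation angle updated and branched on inside one pass) by a staged pipeline: resolve segment infos, prefix-count quarter turns, rotate each segment's local delta into world coordinates via a mod-4 table, and prefix-sum the world deltas.
import Mathlib
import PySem

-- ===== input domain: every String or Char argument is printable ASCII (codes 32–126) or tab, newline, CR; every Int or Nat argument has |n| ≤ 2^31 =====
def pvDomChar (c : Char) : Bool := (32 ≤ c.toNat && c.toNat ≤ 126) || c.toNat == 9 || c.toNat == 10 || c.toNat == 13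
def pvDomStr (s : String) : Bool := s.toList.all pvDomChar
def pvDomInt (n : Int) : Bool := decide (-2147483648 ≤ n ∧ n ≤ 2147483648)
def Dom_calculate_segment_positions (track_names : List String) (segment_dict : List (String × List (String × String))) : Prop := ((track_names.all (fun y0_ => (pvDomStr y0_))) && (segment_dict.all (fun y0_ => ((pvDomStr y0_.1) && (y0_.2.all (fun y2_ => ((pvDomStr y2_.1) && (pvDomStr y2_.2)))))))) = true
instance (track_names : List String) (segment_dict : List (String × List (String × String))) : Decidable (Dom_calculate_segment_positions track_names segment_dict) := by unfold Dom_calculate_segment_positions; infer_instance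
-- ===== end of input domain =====

-- B replaces A's single stateful turtle loop by a staged pipeline (prefix turn counts, mod-4 rotation table, prefix sums); alternative, same cost.


-- ===== PORT A =====
-- int(segment_info.get(k, 0)); on Pre_ the parse succeeds, so the getD 0 default is never taken on admitted inputs
def aDelta (info : List (String × String)) (k : String) : Int :=
  match (PySem.Dict.mk info).get? k with
  | some s => (PySem.Int.ofStr? s).getD 0
  | none => 0

def aStep (segment_dict : List (String × List (String × String)))
    (st : (Int × Int × Int) × Int × List (Int × Int × Int)) (name : String) :
    (Int × Int × Int) × Int × List (Int × Int × Int) :=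
  let info := ((PySem.Dict.mk segment_dict).get? name).getD []
  let forward_delta := aDelta info "ForwardDelta"
  let sideways_delta := aDelta info "SidewaysDelta"
  let elevation_delta := aDelta info "ElevationDelta"
  let x := st.1.1; let y := st.1.2.1; let z := st.1.2.2
  let ori := st.2.1
  let xy : Int × Int :=
    if ori = 0 then (x + forward_delta, y + sideways_delta)
    else if ori = 90 then (x - sideways_delta, y + forward_delta)
    else if ori = 180 then (x - forward_delta, y - sideways_delta)
    else if ori = 270 then (x + sideways_delta, y - forward_delta)
    else (x, y)
  let z' := z + elevation_delta
  let positions := st.2.2 ++ [(xy.1, xy.2, z')]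
  let direction_delta := (PySem.Dict.mk info).get? "DirectionDelta"
  let ori' :=
    if direction_delta = some "DIR_90_DEG_LEFT" then ori + 90
    else if direction_delta = some "DIR_90_DEG_RIGHT" then ori - 90
    else ori
  ((xy.1, xy.2, z'), PySem.Int.mod ori' 360, positions)

def calculate_segment_positions (track_names : List String) (segment_dict : List (String × List (String × String))) : List (Int × Int × Int) :=
  (track_names.foldl (aStep segment_dict) ((0, 0, 0), 0, [(0, 0, 0)])).2.2

-- ===== PORT B =====
def bDelta (info : List (String × String)) (k : String) : Int :=
  match (PySem.Dict.mk info).get? k with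
  | some s => (PySem.Int.ofStr? s).getD 0
  | none => 0

-- body of B's turn-counting loop: the quarter-turn contribution of one segment
def bTurnStep (info : List (String × String)) : Int :=
  let d := (PySem.Dict.mk info).get? "DirectionDelta"
  if d = some "DIR_90_DEG_LEFT" then 1
  else if d = some "DIR_90_DEG_RIGHT" then -1
  else 0

-- the tuple lookups COS[m] and SIN[m]; m = t % 4 is always in {0,1,2,3} (exact hand port of constant-tuple indexing)
def bCos (m : Int) : Int := if m = 0 then 1 else if m = 1 then 0 else if m = 2 then -1 else 0
def bSin (m : Int) : Int := if m = 0 then 0 else if m = 1 then 1 else if m = 2 then 0 else -1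

-- body of B's deltas loop: rotate one segment's local delta into world coordinates
def bWorldDelta (p : List (String × String) × Int) : Int × Int × Int :=
  let f := bDelta p.1 "ForwardDelta"
  let s := bDelta p.1 "SidewaysDelta"
  let e := bDelta p.1 "ElevationDelta"
  let m := PySem.Int.mod p.2 4
  (f * bCos m - s * bSin m, f * bSin m + s * bCos m, e)

-- body of B's turns loop (state: turns list so far, running quarter-turn count)
def bTurnFold (st : List Int × Int) (info : List (String × String)) : List Int × Int :=
  (st.1 ++ [st.2], st.2 + bTurnStep info)

-- body of B's final prefix-sum loop (state: (x,y,z), positions list)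
def bPosFold (st : (Int × Int × Int) × List (Int × Int × Int)) (d : Int × Int × Int) :
    (Int × Int × Int) × List (Int × Int × Int) :=
  let x := st.1.1 + d.1
  let y := st.1.2.1 + d.2.1
  let z := st.1.2.2 + d.2.2
  ((x, y, z), st.2 ++ [(x, y, z)])

def calculate_segment_positions_alt (track_names : List String) (segment_dict : List (String × List (String × String))) : List (Int × Int × Int) :=
  let infos := track_names.map (fun n => ((PySem.Dict.mk segment_dict).get? n).getD [])
  let turns := (infos.foldl bTurnFold ([], 0)).1
  let deltas := (infos.zip turns).map bWorldDelta
  (deltas.foldl bPosFold ((0, 0, 0), [(0, 0, 0)])).2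

-- ===== PRECONDITION & SPEC =====
-- Pre_ excludes exactly the inputs where Python's int() raises ValueError on a delta string of a used segment.
def Pre_calculate_segment_positions (track_names : List String) (segment_dict : List (String × List (String × String))) : Prop :=
  (track_names.all (fun name =>
    (["ForwardDelta", "SidewaysDelta", "ElevationDelta"].all (fun k =>
      ((PySem.Dict.mk (((PySem.Dict.mk segment_dict).get? name).getD [])).get? k).all
        (fun s => (PySem.Int.ofStr? s).isSome))))) = true
instance (track_names : List String) (segment_dict : List (String × List (String × String))) : Decidable (Pre_calculate_segment_positions track_names segment_dict) := by unfold Pre_calculate_segment_positions; infer_instance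

def pvWitness_calculate_segment_positions : List String × (List (String × List (String × String))) :=
  (["a", "b", "a"], [("a", [("ForwardDelta", "2"), ("DirectionDelta", "DIR_90_DEG_LEFT")]), ("b", [("SidewaysDelta", "-1"), ("ElevationDelta", "3")])])

def Spec_calculate_segment_positions (track_names : List String) (segment_dict : List (String × List (String × String))) (out : List (Int × Int × Int)) : Prop := out = calculate_segment_positions_alt track_names segment_dict
instance (track_names : List String) (segment_dict : List (String × List (String × String))) (out : List (Int × Int × Int)) : Decidable (Spec_calculate_segment_positions track_names segment_dict out) := by unfold Spec_calculate_segment_positions; infer_instance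

-- ===== CLAIM (what is proved, stated in full; the proofs are below) =====
def Claim_equal_calculate_segment_positions : Prop := ∀ (track_names : List String) (segment_dict : List (String × List (String × String))), Dom_calculate_segment_positions track_names segment_dict → Pre_calculate_segment_positions track_names segment_dict → Spec_calculate_segment_positions track_names segment_dict (calculate_segment_positions track_names segment_dict)

-- ===== LEMMAS AND PROOFS =====

-- the turns list, written as the structural recursion it computes
def turnsRec : Int → List (List (String × String)) → List Int
  | _, [] => []
  | t, i :: r => t :: turnsRec (t + bTurnStep i) r

theorem turnFold_eq (infos : List (List (String × String))) :
    ∀ (acc : List Int) (t : Int), (infos.foldl bTurnFold (acc, t)).1 = acc ++ turnsRec t infos := by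
  induction infos with
  | nil => intro acc t; simp [turnsRec]
  | cons i r ih =>
    intro acc t
    simp only [List.foldl_cons, bTurnFold, turnsRec]
    rw [ih]
    simp

-- one A-step, rewritten as "add the rotated world delta, bump the quarter-turn count"
theorem aStep_eq (segment_dict : List (String × List (String × String))) (name : String)
    (pos : Int × Int × Int) (acc : List (Int × Int × Int)) (t : Int) :
    aStep segment_dict (pos, 90 * PySem.Int.mod t 4, acc) name =
      (let info := ((PySem.Dict.mk segment_dict).get? name).getD []
       let d := bWorldDelta (info, t)
       let p' : Int × Int × Int := (pos.1 + d.1, pos.2.1 + d.2.1, pos.2.2 + d.2.2)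
       (p', 90 * PySem.Int.mod (t + bTurnStep info) 4, acc ++ [p'])) := by
  have e4 : ∀ a : Int, PySem.Int.mod a 4 = a % 4 :=
    fun a => PySem.Int.mod_eq_emod_of_pos (by norm_num)
  have e360 : ∀ a : Int, PySem.Int.mod a 360 = a % 360 :=
    fun a => PySem.Int.mod_eq_emod_of_pos (by norm_num)
  have hcase : t % 4 = 0 ∨ t % 4 = 1 ∨ t % 4 = 2 ∨ t % 4 = 3 := by omega
  rcases hd : (PySem.Dict.mk (((PySem.Dict.mk segment_dict).get? name).getD [])).get? "DirectionDelta" with _ | s <;>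
    simp only [aStep, bWorldDelta, bTurnStep, bCos, bSin, aDelta, bDelta, e4, e360, hd] <;>
    rcases hcase with h | h | h | h <;>
    rw [h] <;> norm_num <;> split_ifs <;>
    first
      | (exfalso; omega)
      | (exfalso; simp_all; done)
      | rfl
      | omega

-- main invariant: A's fold, started at quarter-turn count t, produces B's prefix sums of world deltas
theorem main_eq (segment_dict : List (String × List (String × String))) (track_names : List String) :
    ∀ (pos : Int × Int × Int) (acc : List (Int × Int × Int)) (t : Int),
      (track_names.foldl (aStep segment_dict) (pos, 90 * PySem.Int.mod t 4, acc)).2.2 =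
        ((((track_names.map (fun n => ((PySem.Dict.mk segment_dict).get? n).getD [])).zip
            (turnsRec t (track_names.map (fun n => ((PySem.Dict.mk segment_dict).get? n).getD [])))).map
            bWorldDelta).foldl bPosFold (pos, acc)).2 := by
  induction track_names with
  | nil => intro pos acc t; simp
  | cons name rest ih =>
    intro pos acc t
    simp only [List.foldl_cons, List.map_cons, turnsRec, List.zip_cons_cons]
    rw [aStep_eq]
    simp only [bPosFold]
    exact ih _ _ _

-- ===== VERDICT (by name: the statement is the Claim_ definition above) =====
theorem calculate_segment_positions_spec : Claim_equal_calculate_segment_positions := by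
  intro track_names segment_dict _ _
  unfold Spec_calculate_segment_positions calculate_segment_positions calculate_segment_positions_alt
  have hmain := main_eq segment_dict track_names (0, 0, 0) [(0, 0, 0)] 0
  norm_num [PySem.Int.mod] at hmain
  simp only [turnFold_eq, List.nil_append]
  exact hmain
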